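-- pv_equiv track=rewrite | github.com/mikbuch/pyseeg | pyseeg/modules/spellerlib.py | col_change
-- ===== SOURCE A (Python) =====
-- def col_change(num, highlighted):
--     real_num = num * 4 + 2
--     new = []
--     for row in range(len(highlighted)):
--         new.append('')
--         for col in range(len(highlighted[row])):
--
--             if col == real_num - 2 or col == real_num + 2:
--                 if row == 0 or row == len(highlighted) - 1:
--                     new[-1] += '+'
--                 else:
--                     new[-1] += '|'
--             elif (col == real_num - 1 or col == real_num or col == real_num + 1)\
--                     and (row == 0 or row == len(highlighted)-1):
--                 new[-1] += '-'
--             else: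
--                 new[-1] += highlighted[row][col]
--     return new
-- ===== SOURCE B (Python) =====
-- def col_change(num, highlighted):
--     real_num = num * 4 + 2
--     n = len(highlighted)
--     new = []
--     for row, s in enumerate(highlighted):
--         chars = list(s)
--         edge = (row == 0 or row == n - 1)
--         for pos in (real_num - 2, real_num + 2):
--             if 0 <= pos < len(chars):
--                 chars[pos] = '+' if edge else '|'
--         if edge:
--             for pos in (real_num - 1, real_num, real_num + 1):
--                 if 0 <= pos < len(chars):
--                     chars[pos] = '-'
--         new.append(''.join(chars))
--     return new
-- ===== Notes on version B (the rewrite author's own statement) =====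
-- stated objective: simpler
-- what changed: B copies each row and overwrites only the up-to-five affected positions (guarded by bounds checks) instead of A's per-character scan with a three-way branch on every column.
import Mathlib
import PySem

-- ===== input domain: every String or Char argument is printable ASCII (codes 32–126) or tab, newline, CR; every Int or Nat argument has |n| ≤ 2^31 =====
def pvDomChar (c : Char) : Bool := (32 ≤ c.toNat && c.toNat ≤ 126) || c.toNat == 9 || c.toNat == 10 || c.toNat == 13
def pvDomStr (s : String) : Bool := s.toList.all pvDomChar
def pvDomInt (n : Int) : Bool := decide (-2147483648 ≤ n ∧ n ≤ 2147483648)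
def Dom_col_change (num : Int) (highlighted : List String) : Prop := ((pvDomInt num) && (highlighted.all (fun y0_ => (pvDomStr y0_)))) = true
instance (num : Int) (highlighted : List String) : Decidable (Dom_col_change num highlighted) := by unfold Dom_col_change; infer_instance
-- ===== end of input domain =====

-- B copies each row and overwrites only the few affected positions instead of branching on every column (objective: simpler).

-- ===== PORT A =====
-- A scans every column of every row, appending one character per column chosen by a three-way branch.
def col_change (num : Int) (highlighted : List String) : List String :=
  let real_num := num * 4 + 2
  (List.range highlighted.length).foldl (fun new row =>
    let rowStr := (highlighted.getD row "").toList
    new ++ [String.mk ((List.range rowStr.length).foldl (fun acc (col : Nat) =>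
      acc ++ [if (col : Int) = real_num - 2 ∨ (col : Int) = real_num + 2 then
                (if row = 0 ∨ row = highlighted.length - 1 then '+' else '|')
              else if ((col : Int) = real_num - 1 ∨ (col : Int) = real_num ∨ (col : Int) = real_num + 1)
                      ∧ (row = 0 ∨ row = highlighted.length - 1) then '-'
              else rowStr.getD col ' ']) [])]) []

-- ===== PORT B =====
-- chars[pos] = c  guarded by  0 <= pos < len(chars)
def pvSetIf (cs : List Char) (pos : Int) (c : Char) : List Char :=
  if 0 ≤ pos ∧ pos < (cs.length : Int) then cs.set pos.toNat c else cs

def col_change_alt (num : Int) (highlighted : List String) : List String :=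
  let real_num := num * 4 + 2
  let n := highlighted.length
  (PySem.List.enumerate highlighted).map (fun rs =>
    let row := rs.1
    let s := rs.2
    let edge := row = 0 ∨ row = (n : Int) - 1
    let mark : Char := if edge then '+' else '|'
    let chars := pvSetIf (pvSetIf s.toList (real_num - 2) mark) (real_num + 2) mark
    let chars := if edge then
        pvSetIf (pvSetIf (pvSetIf chars (real_num - 1) '-') real_num '-') (real_num + 1) '-'
      else chars
    String.mk chars)

-- ===== PRECONDITION & SPEC =====
def Spec_col_change (num : Int) (highlighted : List String) (out : List String) : Prop := out = col_change_alt num highlighted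
instance (num : Int) (highlighted : List String) (out : List String) : Decidable (Spec_col_change num highlighted out) := by unfold Spec_col_change; infer_instance

-- ===== CLAIM (what is proved, stated in full; the proofs are below) =====
def Claim_equal_col_change : Prop := ∀ (num : Int) (highlighted : List String), Dom_col_change num highlighted → Spec_col_change num highlighted (col_change num highlighted)

-- ===== LEMMAS AND PROOFS =====

theorem pvSetIf_length (cs : List Char) (pos : Int) (c : Char) :
    (pvSetIf cs pos c).length = cs.length := by
  unfold pvSetIf; split <;> simp

theorem pvSetIf_getElem (cs : List Char) (pos : Int) (c : Char) (i : Nat) (hi : i < cs.length) :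
    (pvSetIf cs pos c)[i]'(by rw [pvSetIf_length]; exact hi) = if (i : Int) = pos then c else cs[i] := by
  unfold pvSetIf
  split
  · rename_i h
    rw [List.getElem_set]
    by_cases he : (i : Int) = pos
    · have : pos.toNat = i := by omega
      simp [this, he]
    · have : pos.toNat ≠ i := by omega
      simp [this, he]
  · rename_i h
    have : (i : Int) ≠ pos := by omega
    simp [this]

-- A's inner loop builds exactly the list of per-column characters.
theorem foldl_append_char (f : Nat → Char) (l : List Nat) (acc : List Char) :
    l.foldl (fun a col => a ++ [f col]) acc = acc ++ l.map f := by
  induction l generalizing acc with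
  | nil => simp
  | cons x xs ih => simp [List.foldl_cons, ih]

-- A's outer loop is a map over row indices.
theorem foldl_append_row (g : Nat → String) (l : List Nat) (acc : List String) :
    l.foldl (fun a r => a ++ [g r]) acc = acc ++ l.map g := by
  induction l generalizing acc with
  | nil => simp
  | cons x xs ih => simp [List.foldl_cons, ih]

-- Per-row agreement: the per-column scan equals the copy with a few guarded edits.
theorem row_eq (real_num : Int) (E : Prop) [Decidable E] (cs : List Char) :
    (List.range cs.length).map (fun (col : Nat) =>
      if (col : Int) = real_num - 2 ∨ (col : Int) = real_num + 2 then (if E then '+' else '|')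
      else if ((col : Int) = real_num - 1 ∨ (col : Int) = real_num ∨ (col : Int) = real_num + 1) ∧ E then '-'
      else cs.getD col ' ') =
    (if E then
      pvSetIf (pvSetIf (pvSetIf
        (pvSetIf (pvSetIf cs (real_num - 2) '+') (real_num + 2) '+')
        (real_num - 1) '-') real_num '-') (real_num + 1) '-'
     else pvSetIf (pvSetIf cs (real_num - 2) '|') (real_num + 2) '|') := by
  by_cases hE : E
  · simp only [hE, if_pos]
    apply List.ext_getElem
    · simp [pvSetIf_length]
    · intro i h1 h2
      have hi : i < cs.length := by simpa [pvSetIf_length] using h2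
      simp only [List.getElem_map, List.getElem_range]
      rw [pvSetIf_getElem _ _ _ _ (by simp [pvSetIf_length]; exact hi),
          pvSetIf_getElem _ _ _ _ (by simp [pvSetIf_length]; exact hi),
          pvSetIf_getElem _ _ _ _ (by simp [pvSetIf_length]; exact hi),
          pvSetIf_getElem _ _ _ _ (by simp [pvSetIf_length]; exact hi),
          pvSetIf_getElem _ _ _ _ hi]
      have hgd : cs.getD i ' ' = cs[i] := List.getD_eq_getElem cs ' ' hi
      split_ifs <;> first | rfl | omega | (exact hgd) | simp_all
  · simp only [hE, if_neg, not_false_iff, and_false]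
    apply List.ext_getElem
    · simp [pvSetIf_length]
    · intro i h1 h2
      have hi : i < cs.length := by simpa [pvSetIf_length] using h2
      simp only [List.getElem_map, List.getElem_range]
      rw [pvSetIf_getElem _ _ _ _ (by simp [pvSetIf_length]; exact hi),
          pvSetIf_getElem _ _ _ _ hi]
      have hgd : cs.getD i ' ' = cs[i] := List.getD_eq_getElem cs ' ' hi
      split_ifs <;> first | rfl | omega

-- ===== VERDICT (by name: the statement is the Claim_ definition above) =====
theorem col_change_spec : Claim_equal_col_change := by
  intro num highlighted _
  unfold Spec_col_change col_change col_change_alt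
  simp only
  rw [foldl_append_row]
  simp only [List.nil_append]
  apply List.ext_getElem
  · simp [PySem.List.length_enumerate]
  · intro i h1 h2
    have hi : i < highlighted.length := by simpa using h1
    simp only [List.getElem_map, List.getElem_range, PySem.List.getElem_enumerate]
    rw [foldl_append_char _ _ []]
    simp only [List.nil_append]
    have hget : highlighted.getD i "" = highlighted[i] := List.getD_eq_getElem highlighted "" hi
    rw [hget]
    have hEeq : ((i : Int) = 0 ∨ (i : Int) = (highlighted.length : Int) - 1) ↔
        (i = 0 ∨ i = highlighted.length - 1) := by omega
    rw [row_eq (num * 4 + 2) (i = 0 ∨ i = highlighted.length - 1) highlighted[i].toList]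
    simp only [Int.zero_add, hEeq]
    by_cases hE : i = 0 ∨ i = highlighted.length - 1 <;> simp [hE]
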